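-- pv_equiv track=rewrite | github.com/tomslee/ridehail | ridehail/config.py | _remove_results_section
-- ===== SOURCE A (Python) =====
-- def _remove_results_section(lines):
--     """
--     Remove any existing [RESULTS] section from config file lines.
--
--     Args:
--         lines: List of lines from config file
--
--     Returns:
--         List of lines with [RESULTS] section removed
--     """
--     filtered_lines = []
--     in_results_section = False
--
--     for line in lines:
--         stripped = line.strip()
--
--         # Check if we're entering results section
--         if stripped == "[RESULTS]":
--             in_results_section = True
--             continue
--
--         # Check if we're entering a different section (end of RESULTS)
--         if (
--             in_results_section
--             and stripped.startswith("[")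
--             and stripped.endswith("]")
--         ):
--             in_results_section = False
--             # Include this line (start of new section)
--             filtered_lines.append(line)
--             continue
--
--         # Skip lines while in results section
--         if in_results_section:
--             continue
--
--         # Keep all other lines
--         filtered_lines.append(line)
--     if filtered_lines[-1].strip() != "":
--         filtered_lines.append("\n")
--
--     return filtered_lines
-- ===== SOURCE B (Python) =====
-- def _remove_results_section(lines):
--     """Block-based rewrite: split lines into section blocks, drop [RESULTS] blocks."""
--     blocks = []
--     current = []
--     for line in lines:
--         stripped = line.strip()
--         if stripped.startswith("[") and stripped.endswith("]"):
--             blocks.append(current)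
--             current = [line]
--         else:
--             current.append(line)
--     blocks.append(current)
--
--     filtered_lines = []
--     for block in blocks:
--         if not (block and block[0].strip() == "[RESULTS]"):
--             filtered_lines.extend(block)
--
--     if filtered_lines[-1].strip() != "":
--         filtered_lines.append("\n")
--     return filtered_lines
-- ===== Notes on version B (the rewrite author's own statement) =====
-- stated objective: alternative
-- what changed: Replaced the one-pass boolean state machine (in_results_section flag) by a two-phase grouping: split the lines into section blocks at header lines, then drop every block whose header strips to [RESULTS] and concatenate the rest; Pre_ excludes only the inputs on which both programs raise IndexError (empty filtered result).
import Mathlib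
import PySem

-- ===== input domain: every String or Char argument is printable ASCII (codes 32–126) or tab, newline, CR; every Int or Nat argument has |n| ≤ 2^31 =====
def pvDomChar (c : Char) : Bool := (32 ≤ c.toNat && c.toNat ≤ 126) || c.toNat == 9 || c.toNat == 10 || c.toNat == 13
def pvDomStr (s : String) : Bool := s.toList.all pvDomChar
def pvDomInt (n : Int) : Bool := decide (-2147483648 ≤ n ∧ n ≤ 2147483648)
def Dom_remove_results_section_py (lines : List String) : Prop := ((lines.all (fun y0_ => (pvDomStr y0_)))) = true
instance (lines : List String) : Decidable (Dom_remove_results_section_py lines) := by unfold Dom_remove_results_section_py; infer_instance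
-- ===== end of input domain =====

-- B restructures A's one-pass flag machine into block grouping + block filtering (objective: alternative).
-- Both Pythons raise IndexError exactly when the filtered list is empty; Pre_ excludes those inputs.

-- ===== PORT A =====
-- loop body of A's for-loop over (filtered_lines, in_results_section)
def pvAStep (acc : List String × Bool) (line : String) : List String × Bool :=
  let stripped := PySem.Str.strip line
  if stripped == "[RESULTS]" then (acc.1, true)
  else if acc.2 && (PySem.Str.startswith stripped "[" && PySem.Str.endswith stripped "]") then
    (acc.1 ++ [line], false)
  else if acc.2 then acc
  else (acc.1 ++ [line], acc.2)

def remove_results_section_py (lines : List String) : List String :=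
  let st := lines.foldl pvAStep ([], false)
  -- filtered_lines[-1] raises IndexError on []; that input is excluded by Pre_, and
  -- getLast?.getD "" makes the port total (strip "" = "" so nothing is appended there)
  if PySem.Str.strip (st.1.getLast?.getD "") ≠ "" then st.1 ++ ["\n"] else st.1

-- ===== PORT B =====
-- block 'keep' test: not (block and block[0].strip() == "[RESULTS]")
def pvKeep (b : List String) : Bool :=
  match b with
  | [] => true
  | l :: _ => !(PySem.Str.strip l == "[RESULTS]")

-- loop body of B's first loop over (blocks, current)
def pvBStep (acc : List (List String) × List String) (line : String) : List (List String) × List String :=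
  let stripped := PySem.Str.strip line
  if PySem.Str.startswith stripped "[" && PySem.Str.endswith stripped "]" then
    (acc.1 ++ [acc.2], [line])
  else (acc.1, acc.2 ++ [line])

def remove_results_section_py_alt (lines : List String) : List String :=
  let st := lines.foldl pvBStep ([], [])
  let blocks := st.1 ++ [st.2]
  let filtered := blocks.foldl (fun acc b => if pvKeep b then acc ++ b else acc) []
  -- filtered_lines[-1] raises IndexError on []; excluded by Pre_, totalized as in port A
  if PySem.Str.strip (filtered.getLast?.getD "") ≠ "" then filtered ++ ["\n"] else filtered

-- ===== PRECONDITION & SPEC =====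
-- Pre_ excludes exactly the inputs on which Python A raises IndexError (filtered_lines
-- empty: every line is removed as part of a [RESULTS] section); B raises there too.
-- A line survives iff it is a non-[RESULTS] section header, or a non-header line with
-- no earlier line stripping to "[RESULTS]".
def Pre_remove_results_section_py (lines : List String) : Prop :=
  ∃ i < lines.length,
    ((PySem.Str.startswith (PySem.Str.strip (lines.getD i "")) "[" &&
      PySem.Str.endswith (PySem.Str.strip (lines.getD i "")) "]") = true ∧
      PySem.Str.strip (lines.getD i "") ≠ "[RESULTS]") ∨
    ((PySem.Str.startswith (PySem.Str.strip (lines.getD i "")) "[" &&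
      PySem.Str.endswith (PySem.Str.strip (lines.getD i "")) "]") = false ∧
      ∀ l ∈ lines.take i, PySem.Str.strip l ≠ "[RESULTS]")
instance (lines : List String) : Decidable (Pre_remove_results_section_py lines) := by
  unfold Pre_remove_results_section_py; infer_instance

def pvWitness_remove_results_section_py : List String := ["x"]

def Spec_remove_results_section_py (lines : List String) (out : List String) : Prop :=
  out = remove_results_section_py_alt lines
instance (lines : List String) (out : List String) : Decidable (Spec_remove_results_section_py lines out) := by
  unfold Spec_remove_results_section_py; infer_instance

-- ===== CLAIM (what is proved, stated in full; the proofs are below) =====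
def Claim_equal_remove_results_section_py : Prop :=
  ∀ (lines : List String), Dom_remove_results_section_py lines →
    Pre_remove_results_section_py lines →
    Spec_remove_results_section_py lines (remove_results_section_py lines)

-- ===== LEMMAS AND PROOFS =====

-- contribution of a block to B's output
def pvK (b : List String) : List String := if pvKeep b then b else []

lemma pvKeep_append (cur : List String) (line : String) :
    pvKeep (cur ++ [line]) = (match cur with | [] => pvKeep [line] | _ :: _ => pvKeep cur) := by
  cases cur <;> simp [pvKeep]

lemma foldlK (bs : List (List String)) (acc : List String) :
    bs.foldl (fun acc b => if pvKeep b then acc ++ b else acc) acc = acc ++ bs.flatMap pvK := by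
  induction bs generalizing acc with
  | nil => simp
  | cons b bs ih =>
    simp only [List.foldl_cons, List.flatMap_cons, ih, pvK]
    by_cases h : pvKeep b = true <;> simp [h]

lemma step_inv (blocks : List (List String)) (cur : List String) (line : String) :
    pvAStep (blocks.flatMap pvK ++ pvK cur, !pvKeep cur) line
      = ((pvBStep (blocks, cur) line).1.flatMap pvK ++ pvK (pvBStep (blocks, cur) line).2,
         !pvKeep (pvBStep (blocks, cur) line).2) := by
  simp only [pvAStep, pvBStep]
  by_cases hR : (PySem.Str.strip line == "[RESULTS]") = true
  · -- a [RESULTS] line: it is a header too, and its block gets dropped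
    have hH : (PySem.Str.startswith (PySem.Str.strip line) "[" &&
        PySem.Str.endswith (PySem.Str.strip line) "]") = true := by
      rw [eq_of_beq hR]; decide
    have hk : pvKeep [line] = false := by simp [pvKeep, hR]
    rw [if_pos hR, if_pos hH]
    simp [pvK, hk, List.flatMap_append]
  · by_cases hH : (PySem.Str.startswith (PySem.Str.strip line) "[" &&
        PySem.Str.endswith (PySem.Str.strip line) "]") = true
    · -- a non-[RESULTS] header: a new kept block starts
      have hk : pvKeep [line] = true := by simp [pvKeep, hR]
      rw [if_neg hR, if_pos hH]
      have hH' := hH; simp at hH'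
      by_cases hC : pvKeep cur = true
      · rw [hC]
        simp [pvK, hk, hC, hH', List.flatMap_append]
      · rw [Bool.not_eq_true] at hC; rw [hC]
        simp [pvK, hk, hC, hH', List.flatMap_append, List.append_assoc]
    · -- an ordinary line: it is appended to the current block
      have hK : pvKeep (cur ++ [line]) = pvKeep cur := by
        rw [pvKeep_append]
        cases cur with
        | nil => simp [pvKeep, hR]
        | cons a t => rfl
      rw [if_neg hR, if_neg hH]
      have hH' := hH; simp at hH'
      by_cases hC : pvKeep cur = true
      · rw [hC]
        simp [pvK, hK, hC, List.append_assoc]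
      · rw [Bool.not_eq_true] at hC; rw [hC]
        simp [pvK, hK, hC]
        exact hH'

lemma loop_inv (lines : List String) :
    ∀ (blocks : List (List String)) (cur : List String),
      lines.foldl pvAStep (blocks.flatMap pvK ++ pvK cur, !pvKeep cur)
        = (((lines.foldl pvBStep (blocks, cur)).1).flatMap pvK
            ++ pvK (lines.foldl pvBStep (blocks, cur)).2,
           !pvKeep (lines.foldl pvBStep (blocks, cur)).2) := by
  induction lines with
  | nil => intro blocks cur; rfl
  | cons line rest ih =>
    intro blocks cur
    simp only [List.foldl_cons]
    rw [step_inv]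
    rcases hb : pvBStep (blocks, cur) line with ⟨b1, b2⟩
    exact ih b1 b2

lemma filtered_eq (lines : List String) :
    (lines.foldl pvAStep ([], false)).1
      = ((lines.foldl pvBStep ([], [])).1 ++ [(lines.foldl pvBStep ([], [])).2]).foldl
          (fun acc b => if pvKeep b then acc ++ b else acc) [] := by
  have h := loop_inv lines [] []
  simp only [List.flatMap_nil] at h
  have h0 : (([] : List String) ++ pvK [] , !pvKeep ([] : List String))
      = (([] : List String), false) := by simp [pvK, pvKeep]
  rw [h0] at h
  rw [foldlK, List.flatMap_append]
  simp only [h]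
  simp [pvK]

-- ===== VERDICT (by name: the statement is the Claim_ definition above) =====
theorem remove_results_section_py_spec : Claim_equal_remove_results_section_py := by
  intro lines _ _
  unfold Spec_remove_results_section_py remove_results_section_py remove_results_section_py_alt
  simp only [filtered_eq lines]
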